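-- pv_equiv track=rewrite | github.com/Yeongjin-Jo/BackJun | 문자열/Q3. 10809.py | wordCall
-- ===== SOURCE A (Python) =====
-- def wordCall(S):
--     call_list = []
--
--     start = int(ord("a"))
--     for i in range(start, start+26):
--         word_call = False
--         for word_idx in range(len(S)):
--             if i == int(ord(S[word_idx])):
--                 call_list.append(word_idx)
--                 word_call = True
--                 break
--         if word_call == False:
--             call_list.append(-1)
--     return call_list
-- ===== SOURCE B (Python) =====
-- def wordCall(S):
--     first = {}
--     i = 0
--     for ch in S:
--         if ch not in first:
--             first[ch] = i
--         i += 1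
--     return [first.get(chr(c), -1) for c in range(97, 123)]
-- ===== Notes on version B (the rewrite author's own statement) =====
-- stated objective: faster
-- what changed: Replaces the 26 inner scans over S (one per letter) by a single pass over S that records each character's first index in a dict, then reads the 26 answers from the dict.
import Mathlib
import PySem

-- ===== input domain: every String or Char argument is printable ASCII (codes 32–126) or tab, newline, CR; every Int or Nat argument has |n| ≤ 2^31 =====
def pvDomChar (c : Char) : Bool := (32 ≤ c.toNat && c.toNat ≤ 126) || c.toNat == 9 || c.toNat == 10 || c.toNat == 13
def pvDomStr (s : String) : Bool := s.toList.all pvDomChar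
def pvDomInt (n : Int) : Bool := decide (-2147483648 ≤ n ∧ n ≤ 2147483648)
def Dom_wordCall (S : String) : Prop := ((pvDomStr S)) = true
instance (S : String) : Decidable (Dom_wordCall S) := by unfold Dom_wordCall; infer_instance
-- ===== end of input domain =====

-- One honest line: B replaces A's 26 per-letter scans of S by a single pass over S
-- recording each character's first index in a dict; proved to return the same list.


-- ===== PORT A =====
-- inner loop: 'for word_idx in range(len(S)): if i == ord(S[word_idx]): append; break'
-- = scan the characters left to right with a running index, stop at the first match
def pvFindA (cs : List Char) (i : Int) (idx : Int) : Option Int :=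
  match cs with
  | [] => none
  | c :: rest => if i = (c.toNat : Int) then some idx else pvFindA rest i (idx + 1)

def wordCall (S : String) : List Int :=
  (PySem.List.pyRange 97 123 1).foldl
    (fun call_list i =>
      match pvFindA S.toList i 0 with
      | some word_idx => call_list ++ [word_idx]   -- found: append and break
      | none => call_list ++ [-1])                 -- word_call stayed False
    []

-- ===== PORT B =====
def wordCall_alt (S : String) : List Int :=
  let st := S.toList.foldl
    (fun (p : PySem.Dict Char Int × Int) ch =>
      ((if p.1.contains ch then p.1 else p.1.insert ch p.2), p.2 + 1))
    (PySem.Dict.empty, 0)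
  (PySem.List.pyRange 97 123 1).map (fun c => st.1.getD (Char.ofNat c.toNat) (-1))

-- ===== PRECONDITION & SPEC =====
def Spec_wordCall (S : String) (out : List Int) : Prop := out = wordCall_alt S
instance (S : String) (out : List Int) : Decidable (Spec_wordCall S out) := by unfold Spec_wordCall; infer_instance

-- ===== CLAIM (what is proved, stated in full; the proofs are below) =====
def Claim_equal_wordCall : Prop := ∀ (S : String), Dom_wordCall S → Spec_wordCall S (wordCall S)

-- ===== LEMMAS AND PROOFS =====

-- A's outer loop appends one element per letter: it is the map over the range
theorem foldA_eq_map (cs : List Char) (l : List Int) (acc : List Int) :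
    l.foldl (fun call_list i =>
      match pvFindA cs i 0 with
      | some word_idx => call_list ++ [word_idx]
      | none => call_list ++ [-1]) acc
    = acc ++ l.map (fun i => (pvFindA cs i 0).getD (-1)) := by
  induction l generalizing acc with
  | nil => simp
  | cons i rest ih =>
      simp only [List.foldl_cons, List.map_cons, ih]
      cases pvFindA cs i 0 <;> simp

-- B's single pass: the dict holds exactly the first occurrence A's scan finds
theorem build_get? (cs : List Char) (d : PySem.Dict Char Int) (n : Int) (c : Char) :
    ((cs.foldl
      (fun (p : PySem.Dict Char Int × Int) ch =>
        ((if p.1.contains ch then p.1 else p.1.insert ch p.2), p.2 + 1))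
      (d, n)).1).get? c
    = (d.get? c).or (pvFindA cs (c.toNat : Int) n) := by
  induction cs generalizing d n with
  | nil => simp [pvFindA]
  | cons ch rest ih =>
      simp only [List.foldl_cons, ih, pvFindA]
      by_cases hc : c = ch
      · subst hc
        rw [if_pos rfl]
        cases hv : d.get? c with
        | some v =>
            have h : d.contains c = true := by
              rw [PySem.Dict.contains_eq_isSome_get?, hv]; rfl
            rw [if_pos h, hv]; simp
        | none =>
            have h : ¬ d.contains c = true := by
              rw [PySem.Dict.contains_eq_isSome_get?, hv]; simp
            rw [if_neg h, PySem.Dict.get?_insert_self]; simp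
      · have hne : ¬ ((c.toNat : Int) = (ch.toNat : Int)) := by
          intro h
          apply hc
          have hn : c.toNat = ch.toNat := Int.ofNat.inj h
          calc c = Char.ofNat c.toNat := (Char.ofNat_toNat c).symm
            _ = Char.ofNat ch.toNat := by rw [hn]
            _ = ch := Char.ofNat_toNat ch
        rw [if_neg hne]
        by_cases h : d.contains ch = true
        · rw [if_pos h]
        · rw [if_neg h, PySem.Dict.get?_insert_of_ne (hne := hc)]

theorem ofNat_toNat_eq (i : Int) (h1 : 97 ≤ i) (h2 : i < 123) :
    ((Char.ofNat i.toNat).toNat : Int) = i := by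
  rw [Char.toNat_ofNat]
  rw [if_pos (Or.inl (by omega) : i.toNat.isValidChar)]
  omega

-- ===== VERDICT (by name: the statement is the Claim_ definition above) =====
theorem wordCall_spec : Claim_equal_wordCall := by
  intro S _
  unfold Spec_wordCall wordCall wordCall_alt
  rw [foldA_eq_map]
  simp only [List.nil_append]
  apply List.map_congr_left
  intro i hi
  rw [PySem.List.mem_pyRange_one] at hi
  rw [PySem.Dict.getD_eq_get?_getD, build_get? S.toList PySem.Dict.empty 0,
      PySem.Dict.get?_empty, Option.none_or, ofNat_toNat_eq i hi.1 hi.2]
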